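-- pv_equiv track=rewrite | github.com/qqqyd/leetcode | code/1300.py | solution
-- ===== SOURCE A (Python) =====
-- def solution(arr, target):
--     # arr: List[int], target: int
--     arr.sort()
--     n = len(arr)
--     pre_sum = [0]
--     for num in arr:
--         pre_sum.append(pre_sum[-1] + num)
--
--     res = 0
--     diff = target
--     j = 0
--     for i in range(1, arr[-1] + 1):
--         while arr[j] < i:
--             j += 1
--         cur_sum = pre_sum[j] + (n - j) * i
--         if abs(cur_sum - target) < diff:
--             res = i
--             diff = abs(cur_sum - target)
--     return res
-- ===== SOURCE B (Python) =====
-- def solution(arr, target):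
--     # Binary search over the candidate value instead of scanning 1..max(arr).
--     # Like A, sorts arr in place (same observable mutation).
--     arr.sort()
--     hi = arr[-1]
--     if hi < 1:
--         return 0
--
--     def f(v):
--         return sum(x if x < v else v for x in arr)
--
--     # smallest i in [1, hi] with f(i) >= target; hi + 1 if none
--     lo, up, i0 = 1, hi, hi + 1
--     while lo <= up:
--         mid = (lo + up) // 2
--         if f(mid) >= target:
--             i0, up = mid, mid - 1
--         else:
--             lo = mid + 1
--
--     # the minimum of |f(i) - target| is at i0 - 1 or i0 (f is nondecreasing);
--     # value 0 (sum 0) is the baseline, ties keep the smaller candidate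
--     best_i, best_d = 0, target
--     if i0 - 1 >= 1:
--         d = abs(f(i0 - 1) - target)
--         if d < best_d:
--             best_i, best_d = i0 - 1, d
--     if i0 <= hi:
--         d = abs(f(i0) - target)
--         if d < best_d:
--             best_i, best_d = i0, d
--     if best_i == 0:
--         return 0
--
--     # leftmost value with the same clamped sum (ties go to the smallest value)
--     v = f(best_i)
--     lo, up, ans = 1, best_i - 1, best_i
--     while lo <= up:
--         mid = (lo + up) // 2
--         if f(mid) >= v:
--             ans, up = mid, mid - 1
--         else:
--             lo = mid + 1
--     return ans
-- ===== Notes on version B (the rewrite author's own statement) =====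
-- stated objective: alternative
-- what changed: A scans every candidate value 1..max(arr) with a two-pointer and prefix sums; B binary-searches the value range using the monotone clamped sum f(v)=sum(min(x,v)), comparing only the boundary candidates i0-1 and i0, with a second binary search for the leftmost tied value (O(n log max) evaluations instead of an O(max) scan; not measurably faster on the timing inputs, where the sort dominates both).
import Mathlib
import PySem

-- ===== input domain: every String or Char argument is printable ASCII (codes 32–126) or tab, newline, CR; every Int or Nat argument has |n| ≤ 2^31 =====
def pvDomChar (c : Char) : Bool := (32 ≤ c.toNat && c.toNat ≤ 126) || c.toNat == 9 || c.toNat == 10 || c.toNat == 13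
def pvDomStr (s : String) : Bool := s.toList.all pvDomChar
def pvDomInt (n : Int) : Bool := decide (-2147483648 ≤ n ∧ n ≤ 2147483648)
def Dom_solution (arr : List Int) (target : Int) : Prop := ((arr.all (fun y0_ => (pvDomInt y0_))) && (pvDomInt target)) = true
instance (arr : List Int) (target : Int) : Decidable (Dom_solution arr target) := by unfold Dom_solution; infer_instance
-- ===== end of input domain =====

-- B replaces A's scan over every candidate value 1..max(arr) by binary searches over
-- the value range (the clamped sum is monotone); both sort their list argument in
-- place in Python, so the equivalence proved here is about the return value.

-- ===== PORT A =====
-- the inner `while arr[j] < i: j += 1` (when j runs off the end Python raises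
-- IndexError; pyGet? is none there and we stop — unreachable on admitted inputs)
def whileJ (a : List Int) (i : Int) (j : Nat) : Nat :=
  match h : PySem.List.pyGet? a (j : Int) with
  | some x => if x < i then whileJ a i (j + 1) else j
  | none => j
termination_by a.length - j
decreasing_by
  rw [PySem.List.pyGet?_natCast] at h
  have hj : j < a.length := by
    by_contra hc
    rw [List.getElem?_eq_none (by omega)] at h
    simp at h
  omega

def solution (arr : List Int) (target : Int) : Int :=
  let a := PySem.List.sorted arr (fun x => x)
  let n : Int := (a.length : Int)
  -- pre_sum[-1] via pyGet? (-1); the list starts [0] so it is never empty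
  let pre_sum := a.foldl (fun ps num => ps ++ [(PySem.List.pyGet? ps (-1)).getD 0 + num]) [0]
  let st := (PySem.List.pyRange 1 ((PySem.List.pyGet? a (-1)).getD 0 + 1)).foldl
    (fun (s : Int × Int × Nat) i =>
      let j := whileJ a i s.2.2
      let cur_sum := (PySem.List.pyGet? pre_sum ((j : Nat) : Int)).getD 0 + (n - (j : Int)) * i
      if |cur_sum - target| < s.2.1 then (i, |cur_sum - target|, j) else (s.1, s.2.1, j))
    (0, target, 0)
  st.1

-- ===== PORT B =====
-- f(v) = sum(x if x < v else v for x in arr)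
def sumClamp (a : List Int) (v : Int) : Int :=
  a.foldl (fun s x => s + (if x < v then x else v)) 0

-- the `while lo <= up` binary-search loop of Source B (both searches have this shape)
def bsearchLeast (P : Int → Bool) (lo up found : Int) : Int :=
  if h : lo ≤ up then
    let mid := PySem.Int.floordiv (lo + up) 2
    if P mid then bsearchLeast P lo (mid - 1) mid
    else bsearchLeast P (mid + 1) up found
  else found
termination_by (up + 1 - lo).toNat
decreasing_by
  · have hm := PySem.Int.floordiv_two_mid_bounds h; omega
  · have hm := PySem.Int.floordiv_two_mid_bounds h; omega

def solution_alt (arr : List Int) (target : Int) : Int :=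
  let a := PySem.List.sorted arr (fun x => x)
  let hi := (PySem.List.pyGet? a (-1)).getD 0
  if hi < 1 then 0
  else
    let i0 := bsearchLeast (fun i => decide (target ≤ sumClamp a i)) 1 hi (hi + 1)
    let s1 : Int × Int := (0, target)
    let s2 : Int × Int :=
      if 1 ≤ i0 - 1 then
        let d := |sumClamp a (i0 - 1) - target|
        if d < s1.2 then (i0 - 1, d) else s1
      else s1
    let s3 : Int × Int :=
      if i0 ≤ hi then
        let d := |sumClamp a i0 - target|
        if d < s2.2 then (i0, d) else s2
      else s2
    if s3.1 = 0 then 0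
    else
      let v := sumClamp a s3.1
      bsearchLeast (fun i => decide (v ≤ sumClamp a i)) 1 (s3.1 - 1) s3.1

-- ===== PRECONDITION & SPEC =====
-- Pre_ excludes only the empty list, on which A raises IndexError at arr[-1].
def Pre_solution (arr : List Int) (target : Int) : Prop := arr ≠ []
instance (arr : List Int) (target : Int) : Decidable (Pre_solution arr target) := by
  unfold Pre_solution; infer_instance
def pvWitness_solution : List Int × Int := ([2, 3, 5], 10)
def Spec_solution (arr : List Int) (target : Int) (out : Int) : Prop := out = solution_alt arr target
instance (arr : List Int) (target : Int) (out : Int) : Decidable (Spec_solution arr target out) := by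
  unfold Spec_solution; infer_instance

-- ===== CLAIM (what is proved, stated in full; the proofs are below) =====
def Claim_equal_solution : Prop := ∀ (arr : List Int) (target : Int), Dom_solution arr target → Pre_solution arr target → Spec_solution arr target (solution arr target)

-- ===== LEMMAS AND PROOFS =====

-- proof-side names for the two ports' bodies (definitionally equal to them)
def hiOf (a : List Int) : Int := (PySem.List.pyGet? a (-1)).getD 0

def preOf (a : List Int) : List Int :=
  a.foldl (fun ps num => ps ++ [(PySem.List.pyGet? ps (-1)).getD 0 + num]) [0]

def stepA (a : List Int) (target : Int) (s : Int × Int × Nat) (i : Int) : Int × Int × Nat :=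
  let j := whileJ a i s.2.2
  let cur_sum := (PySem.List.pyGet? (preOf a) ((j : Nat) : Int)).getD 0 + (((a.length : Int)) - (j : Int)) * i
  if |cur_sum - target| < s.2.1 then (i, |cur_sum - target|, j) else (s.1, s.2.1, j)

def runA (a : List Int) (target : Int) : Int :=
  ((PySem.List.pyRange 1 (hiOf a + 1)).foldl (stepA a target) (0, target, 0)).1

def s2Of (a : List Int) (target i0 : Int) : Int × Int :=
  if 1 ≤ i0 - 1 then
    if |sumClamp a (i0 - 1) - target| < target then (i0 - 1, |sumClamp a (i0 - 1) - target|)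
    else (0, target)
  else (0, target)

def s3Of (a : List Int) (target i0 hi : Int) : Int × Int :=
  if i0 ≤ hi then
    if |sumClamp a i0 - target| < (s2Of a target i0).2 then (i0, |sumClamp a i0 - target|)
    else s2Of a target i0
  else s2Of a target i0

def tailB (a : List Int) (target i0 hi : Int) : Int :=
  if (s3Of a target i0 hi).1 = 0 then 0
  else bsearchLeast (fun i => decide (sumClamp a (s3Of a target i0 hi).1 ≤ sumClamp a i)) 1
         ((s3Of a target i0 hi).1 - 1) (s3Of a target i0 hi).1

def runB (a : List Int) (target : Int) : Int :=
  if hiOf a < 1 then 0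
  else tailB a target (bsearchLeast (fun i => decide (target ≤ sumClamp a i)) 1 (hiOf a) (hiOf a + 1)) (hiOf a)

def cnt (a : List Int) (i : Int) : Nat := a.countP (fun x => decide (x < i))

def stepP (a : List Int) (target : Int) (s : Int × Int) (i : Int) : Int × Int :=
  if |sumClamp a i - target| < s.2 then (i, |sumClamp a i - target|) else s

lemma solution_eq_runA (arr : List Int) (target : Int) :
    solution arr target = runA (PySem.List.sorted arr (fun x => x)) target := rfl

lemma solution_alt_eq_runB (arr : List Int) (target : Int) :
    solution_alt arr target = runB (PySem.List.sorted arr (fun x => x)) target := rfl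

lemma sorted_lt_iff (a : List Int) (hs : a.Pairwise (· ≤ ·)) (i : Int) :
    ∀ (k : Nat) (hk : k < a.length), (a[k] < i ↔ k < cnt a i) := by
  induction a with
  | nil => intro k hk; simp at hk
  | cons x t ih =>
    rcases List.pairwise_cons.mp hs with ⟨hx, ht⟩
    have hcnt : cnt (x :: t) i = cnt t i + (if x < i then 1 else 0) := by
      simp only [cnt, List.countP_cons]
      by_cases h : x < i <;> simp [h]
    have hzero : ¬ x < i → cnt t i = 0 := by
      intro hxi
      refine List.countP_eq_zero.mpr ?_
      intro y hy
      simp only [decide_eq_true_eq, not_lt]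
      exact le_trans (not_lt.mp hxi) (hx y hy)
    intro k hk
    cases k with
    | zero =>
      simp only [List.getElem_cons_zero, hcnt]
      by_cases hxi : x < i
      · simp [hxi]
      · simp [hxi, hzero hxi]
    | succ k =>
      have hk' : k < t.length := by simpa using hk
      have hih := ih ht k hk'
      simp only [List.getElem_cons_succ, hcnt]
      by_cases hxi : x < i
      · simp only [hxi, if_pos]; omega
      · have h0 := hzero hxi
        have hxk : x ≤ t[k] := hx _ (List.getElem_mem hk')
        simp only [hxi, if_neg, not_false_iff]
        constructor
        · intro hlt; exact absurd hlt (by omega)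
        · intro hlt; omega

lemma cnt_le (a : List Int) (i : Int) : cnt a i ≤ a.length := List.countP_le_length

lemma cnt_mono (a : List Int) {i i' : Int} (h : i ≤ i') : cnt a i ≤ cnt a i' := by
  refine List.countP_mono_left ?_
  intro x _ hx
  simp only [decide_eq_true_eq] at *
  omega

lemma whileJ_eq (a : List Int) (hs : a.Pairwise (· ≤ ·)) (i : Int) :
    ∀ (j : Nat), j ≤ cnt a i → whileJ a i j = cnt a i := by
  have key : ∀ (m j : Nat), a.length - j ≤ m → j ≤ cnt a i → whileJ a i j = cnt a i := by
    intro m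
    induction m with
    | zero =>
      intro j hm hj
      have hcl := cnt_le a i
      have hjeq : j = cnt a i := by omega
      rw [whileJ]
      split
      · next x h =>
          rw [PySem.List.pyGet?_natCast, List.getElem?_eq_none (by omega)] at h
          simp at h
      · exact hjeq
    | succ m ihm =>
      intro j hm hj
      rcases lt_or_eq_of_le hj with hlt | heq
      · have hjlen : j < a.length := lt_of_lt_of_le hlt (cnt_le a i)
        have hji : a[j] < i := (sorted_lt_iff a hs i j hjlen).mpr hlt
        rw [whileJ]
        split
        · next x h =>
            rw [PySem.List.pyGet?_natCast, List.getElem?_eq_getElem hjlen] at h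
            injection h with hxeq
            rw [if_pos (hxeq ▸ hji)]
            exact ihm (j + 1) (by omega) (by omega)
        · next h =>
            rw [PySem.List.pyGet?_natCast, List.getElem?_eq_getElem hjlen] at h
            simp at h
      · by_cases hjl : j < a.length
        · have hji : ¬ a[j] < i := by
            rw [sorted_lt_iff a hs i j hjl]; omega
          rw [whileJ]
          split
          · next x h =>
              rw [PySem.List.pyGet?_natCast, List.getElem?_eq_getElem hjl] at h
              injection h with hxeq
              rw [if_neg (hxeq ▸ hji)]
              exact heq
          · next h => exact heq
        · rw [whileJ]
          split
          · next x h =>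
              rw [PySem.List.pyGet?_natCast, List.getElem?_eq_none (by omega)] at h
              simp at h
          · next h => exact heq
  intro j hj
  exact key a.length j (by omega) hj

def preAux (s : Int) : List Int → List Int
  | [] => []
  | x :: t => (s + x) :: preAux (s + x) t

lemma foldl_pre (a : List Int) : ∀ (p : List Int) (s : Int),
    a.foldl (fun ps num => ps ++ [(PySem.List.pyGet? ps (-1)).getD 0 + num]) (p ++ [s])
      = p ++ [s] ++ preAux s a := by
  induction a with
  | nil => intro p s; simp [preAux]
  | cons x t ih =>
    intro p s
    simp only [List.foldl_cons, PySem.List.pyGet?_neg_one_append_singleton, Option.getD_some]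
    rw [ih (p ++ [s]) (s + x)]
    simp [preAux]

lemma preAux_get : ∀ (a : List Int) (s : Int) (k : Nat), k < a.length →
    (preAux s a)[k]? = some (s + (a.take (k + 1)).sum) := by
  intro a
  induction a with
  | nil => intro s k hk; simp at hk
  | cons x t ih =>
    intro s k hk
    cases k with
    | zero => simp [preAux]
    | succ k =>
      simp only [preAux, List.getElem?_cons_succ]
      rw [ih (s + x) k (by simpa using hk)]
      simp only [List.take_succ_cons, List.sum_cons, Option.some.injEq]
      ring

lemma pre_get (a : List Int) (j : Nat) (hj : j ≤ a.length) :
    (PySem.List.pyGet? (preOf a) ((j : Nat) : Int)).getD 0 = (a.take j).sum := by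
  unfold preOf
  have h := foldl_pre a [] 0
  simp only [List.nil_append] at h
  rw [h, PySem.List.pyGet?_natCast]
  cases j with
  | zero => simp
  | succ k =>
    have : ([(0 : Int)] ++ preAux 0 a)[k + 1]? = (preAux 0 a)[k]? := by simp
    rw [this, preAux_get a 0 k (by omega)]
    simp

lemma sumClamp_eq (a : List Int) (hs : a.Pairwise (· ≤ ·)) (i : Int) :
    sumClamp a i = (a.take (cnt a i)).sum + ((a.length : Int) - (cnt a i : Int)) * i := by
  unfold sumClamp
  rw [PySem.List.foldl_add]
  have hcl : cnt a i ≤ a.length := cnt_le a i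
  have h1 : ∀ x ∈ a.take (cnt a i), x < i := by
    intro x hx
    obtain ⟨k, hk, hkx⟩ := List.mem_iff_getElem.mp hx
    have hk2 : k < cnt a i := by
      have := hk; rw [List.length_take] at this; omega
    have hk3 : k < a.length := by omega
    rw [← hkx, List.getElem_take]
    exact (sorted_lt_iff a hs i k hk3).mpr hk2
  have h2 : ∀ x ∈ a.drop (cnt a i), ¬ x < i := by
    intro x hx
    obtain ⟨k, hk, hkx⟩ := List.mem_iff_getElem.mp hx
    have hk2 : cnt a i + k < a.length := by
      have := hk; rw [List.length_drop] at this; omega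
    rw [← hkx, List.getElem_drop]
    rw [sorted_lt_iff a hs i (cnt a i + k) hk2]
    omega
  conv_lhs => rw [← List.take_append_drop (cnt a i) a]
  rw [List.map_append, List.sum_append]
  have e1 : (a.take (cnt a i)).map (fun x => if x < i then x else i) = a.take (cnt a i) := by
    rw [List.map_congr_left (fun x h => if_pos (h1 x h))]
    exact List.map_id _
  have e2 : ((a.drop (cnt a i)).map (fun x => if x < i then x else i)).sum
      = ((a.length : Int) - (cnt a i : Int)) * i := by
    rw [List.map_congr_left (fun x h => if_neg (h2 x h))]
    rw [PySem.List.sum_map_const_int]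
    rw [List.length_drop]
    push_cast [hcl]
    ring
  rw [e1, e2]
  ring

lemma sumClamp_mono (a : List Int) {v w : Int} (h : v ≤ w) : sumClamp a v ≤ sumClamp a w := by
  unfold sumClamp
  rw [PySem.List.foldl_add, PySem.List.foldl_add]
  simp only [zero_add]
  refine List.sum_le_sum ?_
  intro x _
  split_ifs <;> omega

lemma foldA_eq_foldP (a : List Int) (target : Int) (hs : a.Pairwise (· ≤ ·)) (b : Int) :
    ∀ (lo : Int) (r d : Int) (j : Nat), j ≤ cnt a lo →
      (((PySem.List.pyRange lo b).foldl (stepA a target) (r, d, j)).1,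
       ((PySem.List.pyRange lo b).foldl (stepA a target) (r, d, j)).2.1)
      = (PySem.List.pyRange lo b).foldl (stepP a target) (r, d) := by
  have key : ∀ (m : Nat) (lo : Int) (r d : Int) (j : Nat), (b - lo).toNat ≤ m → j ≤ cnt a lo →
      (((PySem.List.pyRange lo b).foldl (stepA a target) (r, d, j)).1,
       ((PySem.List.pyRange lo b).foldl (stepA a target) (r, d, j)).2.1)
      = (PySem.List.pyRange lo b).foldl (stepP a target) (r, d) := by
    intro m
    induction m with
    | zero =>
      intro lo r d j hm hj
      rw [PySem.List.pyRange_one_eq_nil (by omega)]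
      rfl
    | succ m ihm =>
      intro lo r d j hm hj
      by_cases hlb : lo < b
      · rw [PySem.List.pyRange_one_cons hlb]
        simp only [List.foldl_cons]
        have hw : whileJ a lo j = cnt a lo := whileJ_eq a hs lo j hj
        have hcur : (PySem.List.pyGet? (preOf a) ((cnt a lo : Nat) : Int)).getD 0
            + ((a.length : Int) - (cnt a lo : Int)) * lo = sumClamp a lo := by
          rw [pre_get a _ (cnt_le a lo), sumClamp_eq a hs lo]
        have hstepA : stepA a target (r, d, j) lo
            = (if |sumClamp a lo - target| < d then (lo, |sumClamp a lo - target|, cnt a lo)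
               else (r, d, cnt a lo)) := by
          show (let j' := whileJ a lo j;
            let cur_sum := (PySem.List.pyGet? (preOf a) ((j' : Nat) : Int)).getD 0 + (((a.length : Int)) - (j' : Int)) * lo;
            if |cur_sum - target| < d then (lo, |cur_sum - target|, j') else (r, d, j')) = _
          rw [hw]
          simp only []
          rw [hcur]
        have hstepP : stepP a target (r, d) lo
            = (if |sumClamp a lo - target| < d then (lo, |sumClamp a lo - target|) else (r, d)) := rfl
        rw [hstepA, hstepP]
        split_ifs with hcond
        · exact ihm (lo + 1) lo |sumClamp a lo - target| (cnt a lo) (by omega) (cnt_mono a (by omega))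
        · exact ihm (lo + 1) r d (cnt a lo) (by omega) (cnt_mono a (by omega))
      · rw [PySem.List.pyRange_one_eq_nil (by omega)]
        rfl
  intro lo r d j hj
  exact key (b - lo).toNat lo r d j (le_refl _) hj

lemma foldP_spec (a : List Int) (target : Int) (b : Int) :
    ∀ (lo : Int) (r d : Int),
      (((PySem.List.pyRange lo b).foldl (stepP a target) (r, d)).2 ≤ d) ∧
      (∀ i, lo ≤ i → i < b → ((PySem.List.pyRange lo b).foldl (stepP a target) (r, d)).2 ≤ |sumClamp a i - target|) ∧
      ((((PySem.List.pyRange lo b).foldl (stepP a target) (r, d)) = (r, d)) ∨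
        (lo ≤ ((PySem.List.pyRange lo b).foldl (stepP a target) (r, d)).1 ∧
         ((PySem.List.pyRange lo b).foldl (stepP a target) (r, d)).1 < b ∧
         |sumClamp a (((PySem.List.pyRange lo b).foldl (stepP a target) (r, d)).1) - target|
           = ((PySem.List.pyRange lo b).foldl (stepP a target) (r, d)).2 ∧
         ((PySem.List.pyRange lo b).foldl (stepP a target) (r, d)).2 < d ∧
         ∀ i, lo ≤ i → i < ((PySem.List.pyRange lo b).foldl (stepP a target) (r, d)).1 →
           ((PySem.List.pyRange lo b).foldl (stepP a target) (r, d)).2 < |sumClamp a i - target|)) := by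
  have key : ∀ (m : Nat) (lo : Int) (r d : Int), (b - lo).toNat ≤ m →
      (((PySem.List.pyRange lo b).foldl (stepP a target) (r, d)).2 ≤ d) ∧
      (∀ i, lo ≤ i → i < b → ((PySem.List.pyRange lo b).foldl (stepP a target) (r, d)).2 ≤ |sumClamp a i - target|) ∧
      ((((PySem.List.pyRange lo b).foldl (stepP a target) (r, d)) = (r, d)) ∨
        (lo ≤ ((PySem.List.pyRange lo b).foldl (stepP a target) (r, d)).1 ∧
         ((PySem.List.pyRange lo b).foldl (stepP a target) (r, d)).1 < b ∧
         |sumClamp a (((PySem.List.pyRange lo b).foldl (stepP a target) (r, d)).1) - target|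
           = ((PySem.List.pyRange lo b).foldl (stepP a target) (r, d)).2 ∧
         ((PySem.List.pyRange lo b).foldl (stepP a target) (r, d)).2 < d ∧
         ∀ i, lo ≤ i → i < ((PySem.List.pyRange lo b).foldl (stepP a target) (r, d)).1 →
           ((PySem.List.pyRange lo b).foldl (stepP a target) (r, d)).2 < |sumClamp a i - target|)) := by
    intro m
    induction m with
    | zero =>
      intro lo r d hm
      rw [PySem.List.pyRange_one_eq_nil (by omega)]
      refine ⟨le_refl _, ?_, Or.inl rfl⟩
      intro i h1 h2; omega
    | succ m ihm =>
      intro lo r d hm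
      by_cases hlb : lo < b
      · rw [PySem.List.pyRange_one_cons hlb]
        simp only [List.foldl_cons]
        have hstepP : stepP a target (r, d) lo
            = (if |sumClamp a lo - target| < d then (lo, |sumClamp a lo - target|) else (r, d)) := rfl
        rw [hstepP]
        split_ifs with hcond
        · obtain ⟨h1, h2, h3⟩ := ihm (lo + 1) lo |sumClamp a lo - target| (by omega)
          refine ⟨le_trans h1 (le_of_lt hcond), ?_, ?_⟩
          · intro i hi1 hi2
            by_cases hieq : i = lo
            · subst hieq; exact h1
            · exact h2 i (by omega) hi2
          · rcases h3 with heq | ⟨ha1, ha2, ha3, ha4, ha5⟩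
            · right
              rw [heq]
              exact ⟨le_refl _, hlb, rfl, hcond, by intro i hi1 hi2; omega⟩
            · right
              refine ⟨by omega, ha2, ha3, lt_trans ha4 hcond, ?_⟩
              intro i hi1 hi2
              by_cases hieq : i = lo
              · subst hieq; exact lt_of_lt_of_le ha4 (le_refl _)
              · exact ha5 i (by omega) hi2
        · obtain ⟨h1, h2, h3⟩ := ihm (lo + 1) r d (by omega)
          refine ⟨h1, ?_, ?_⟩
          · intro i hi1 hi2
            by_cases hieq : i = lo
            · subst hieq; exact le_trans h1 (not_lt.mp hcond)
            · exact h2 i (by omega) hi2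
          · rcases h3 with heq | ⟨ha1, ha2, ha3, ha4, ha5⟩
            · exact Or.inl heq
            · right
              refine ⟨by omega, ha2, ha3, ha4, ?_⟩
              intro i hi1 hi2
              by_cases hieq : i = lo
              · subst hieq; exact lt_of_lt_of_le ha4 (not_lt.mp hcond)
              · exact ha5 i (by omega) hi2
      · rw [PySem.List.pyRange_one_eq_nil (by omega)]
        refine ⟨le_refl _, ?_, Or.inl rfl⟩
        intro i h1 h2; omega
  intro lo r d
  exact key (b - lo).toNat lo r d (le_refl _)

lemma bsearch_spec (P : Int → Bool) (s : Int) (mono : ∀ i j, i ≤ j → P i = true → P j = true) :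
    ∀ (lo up found : Int), lo ≤ up + 1 → found = up + 1 → (P found = true ∨ found = s) →
      (∀ i, 1 ≤ i → i < lo → P i = false) →
      (∀ i, 1 ≤ i → i < bsearchLeast P lo up found → P i = false) ∧
      (P (bsearchLeast P lo up found) = true ∨ bsearchLeast P lo up found = s) ∧
      lo ≤ bsearchLeast P lo up found ∧ bsearchLeast P lo up found ≤ found := by
  have key : ∀ (m : Nat) (lo up found : Int), (up + 1 - lo).toNat ≤ m →
      lo ≤ up + 1 → found = up + 1 → (P found = true ∨ found = s) →
      (∀ i, 1 ≤ i → i < lo → P i = false) →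
      (∀ i, 1 ≤ i → i < bsearchLeast P lo up found → P i = false) ∧
      (P (bsearchLeast P lo up found) = true ∨ bsearchLeast P lo up found = s) ∧
      lo ≤ bsearchLeast P lo up found ∧ bsearchLeast P lo up found ≤ found := by
    intro m
    induction m with
    | zero =>
      intro lo up found hm h1 h2 h3 h4
      rw [bsearchLeast, dif_neg (by omega)]
      exact ⟨fun i hi1 hi2 => h4 i hi1 (by omega), h3, by omega, le_refl _⟩
    | succ m ihm =>
      intro lo up found hm h1 h2 h3 h4
      by_cases hlu : lo ≤ up
      · have hmid := PySem.Int.floordiv_two_mid_bounds hlu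
        have hunf : bsearchLeast P lo up found
            = (if P (PySem.Int.floordiv (lo + up) 2)
               then bsearchLeast P lo (PySem.Int.floordiv (lo + up) 2 - 1) (PySem.Int.floordiv (lo + up) 2)
               else bsearchLeast P (PySem.Int.floordiv (lo + up) 2 + 1) up found) := by
          rw [bsearchLeast, dif_pos hlu]
        rw [hunf]
        split_ifs with hP
        · obtain ⟨c1, c2, c3, c4⟩ := ihm lo (PySem.Int.floordiv (lo + up) 2 - 1)
            (PySem.Int.floordiv (lo + up) 2) (by omega) (by omega) (by omega) (Or.inl hP) h4
          exact ⟨c1, c2, c3, by omega⟩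
        · have hP' : P (PySem.Int.floordiv (lo + up) 2) = false := by
            cases hPe : P (PySem.Int.floordiv (lo + up) 2)
            · rfl
            · exact absurd hPe hP
          have hlow : ∀ i, 1 ≤ i → i < PySem.Int.floordiv (lo + up) 2 + 1 → P i = false := by
            intro i hi1 hi2
            by_cases hil : i < lo
            · exact h4 i hi1 hil
            · cases hPe : P i
              · rfl
              · have hcontra := mono i (PySem.Int.floordiv (lo + up) 2) (by omega) hPe
                rw [hP'] at hcontra
                exact Bool.noConfusion hcontra
          obtain ⟨c1, c2, c3, c4⟩ := ihm (PySem.Int.floordiv (lo + up) 2 + 1) up found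
            (by omega) (by omega) h2 h3 hlow
          exact ⟨c1, c2, by omega, c4⟩
      · rw [bsearchLeast, dif_neg hlu]
        exact ⟨fun i hi1 hi2 => h4 i hi1 (by omega), h3, by omega, le_refl _⟩
  intro lo up found h1 h2 h3 h4
  exact key (up + 1 - lo).toNat lo up found (le_refl _) h1 h2 h3 h4

lemma runA_eq_runB (a : List Int) (target : Int) (hs : a.Pairwise (· ≤ ·)) :
    runA a target = runB a target := by
  unfold runA runB
  set hi := hiOf a with hhi
  by_cases hlt : hi < 1
  · rw [if_pos hlt, PySem.List.pyRange_one_eq_nil (by omega)]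
    rfl
  · rw [if_neg hlt]
    have hfold := foldA_eq_foldP a target hs (hi + 1) 1 0 target 0 (Nat.zero_le _)
    obtain ⟨hC1, hC2, hC3⟩ := foldP_spec a target (hi + 1) 1 0 target
    set out := (PySem.List.pyRange 1 (hi + 1)).foldl (stepP a target) (0, target) with hout
    have hA : ((PySem.List.pyRange 1 (hi + 1)).foldl (stepA a target) (0, target, 0)).1 = out.1 :=
      congrArg Prod.fst hfold
    rw [hA]
    set P1 := fun i => decide (target ≤ sumClamp a i) with hP1
    have hmono1 : ∀ i j, i ≤ j → P1 i = true → P1 j = true := by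
      intro i j hij hp
      simp only [hP1, decide_eq_true_eq] at *
      exact le_trans hp (sumClamp_mono a hij)
    obtain ⟨hB1, hB2, hB3, hB4⟩ := bsearch_spec P1 (hi + 1) hmono1 1 hi (hi + 1)
      (by omega) rfl (Or.inr rfl) (by intro i h1 h2; omega)
    set i0 := bsearchLeast P1 1 hi (hi + 1) with hi0
    have hFlt : ∀ i, 1 ≤ i → i < i0 → sumClamp a i < target := by
      intro i hx hy
      have := hB1 i hx hy
      simp only [hP1, decide_eq_false_iff_not, not_le] at this
      exact this
    have hFge : i0 ≤ hi → target ≤ sumClamp a i0 := by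
      intro h
      rcases hB2 with h' | h'
      · simpa [hP1, decide_eq_true_eq] using h'
      · omega
    rcases hC3 with heq | ⟨hR1, hR2, hR3, hR4, hR5⟩
    · -- no candidate beats the baseline: both return 0
      have hO1 : out.1 = 0 := by rw [heq]
      have hO2 : out.2 = target := by rw [heq]
      have hge : ∀ i, 1 ≤ i → i ≤ hi → target ≤ |sumClamp a i - target| := by
        intro i hx hy
        have := hC2 i hx (by omega)
        rw [hO2] at this
        exact this
      have hd1 : 1 ≤ i0 - 1 → ¬(|sumClamp a (i0 - 1) - target| < target) :=
        fun h => not_lt.mpr (hge _ h (by omega))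
      have hd2 : i0 ≤ hi → ¬(|sumClamp a i0 - target| < target) :=
        fun h => not_lt.mpr (hge _ (by omega) h)
      have hs2 : s2Of a target i0 = (0, target) := by
        unfold s2Of
        split_ifs with h1 h2
        · exact absurd h2 (hd1 h1)
        · rfl
        · rfl
      have hs3 : s3Of a target i0 hi = (0, target) := by
        unfold s3Of
        rw [hs2]
        split_ifs with h1 h2
        · exact absurd h2 (hd2 h1)
        · rfl
        · rfl
      rw [hO1]
      unfold tailB
      rw [hs3]
      norm_num
    · -- an improving candidate exists; out.1 is the least argmin
      have hi0ub : i0 ≤ hi + 1 := hB4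
      have hR2' : out.1 ≤ hi := by omega
      by_cases hcase : out.1 < i0
      · -- the winning candidate is i0 - 1
        have h2le : 2 ≤ i0 := by omega
        have hFR : sumClamp a out.1 < target := hFlt _ hR1 hcase
        have hgR : target - sumClamp a out.1 = out.2 := by
          rw [abs_of_neg (by omega)] at hR3; omega
        have hF1lt : sumClamp a (i0 - 1) < target := hFlt _ (by omega) (by omega)
        have hmR : sumClamp a out.1 ≤ sumClamp a (i0 - 1) := sumClamp_mono a (by omega)
        have hd1le : |sumClamp a (i0 - 1) - target| ≤ out.2 := by
          rw [abs_of_neg (by omega)]; omega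
        have hd1ge : out.2 ≤ |sumClamp a (i0 - 1) - target| := hC2 _ (by omega) (by omega)
        have hd1 : |sumClamp a (i0 - 1) - target| = out.2 := le_antisymm hd1le hd1ge
        have hgQ : target - sumClamp a (i0 - 1) = out.2 := by
          have hd1' := hd1
          rw [abs_of_neg (by omega)] at hd1'; omega
        have hveq : sumClamp a (i0 - 1) = sumClamp a out.1 := by omega
        have hs2 : s2Of a target i0 = (i0 - 1, out.2) := by
          unfold s2Of
          rw [if_pos (by omega : (1:Int) ≤ i0 - 1), hd1, if_pos hR4]
        have hs3 : s3Of a target i0 hi = (i0 - 1, out.2) := by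
          unfold s3Of
          rw [hs2]
          split_ifs with h1 h2
          · exfalso
            have hc := hC2 i0 (by omega) (by omega)
            have h2' : |sumClamp a i0 - target| < out.2 := h2
            omega
          · rfl
          · rfl
        unfold tailB
        rw [hs3]
        rw [show ((i0 - 1, out.2) : Int × Int).1 = i0 - 1 from rfl]
        rw [if_neg (by omega : ¬ i0 - 1 = 0)]
        set P2 := fun i => decide (sumClamp a (i0 - 1) ≤ sumClamp a i) with hP2
        have hmono2 : ∀ i j, i ≤ j → P2 i = true → P2 j = true := by
          intro i j hij hp
          simp only [hP2, decide_eq_true_eq] at *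
          exact le_trans hp (sumClamp_mono a hij)
        obtain ⟨hb1, hb2, hb3, hb4⟩ := bsearch_spec P2 (i0 - 1) hmono2 1 (i0 - 1 - 1) (i0 - 1)
          (by omega) (by omega) (Or.inl (by simp [hP2])) (by intro i h1 h2; omega)
        set ans := bsearchLeast P2 1 (i0 - 1 - 1) (i0 - 1) with hans
        have hansF : sumClamp a (i0 - 1) ≤ sumClamp a ans := by
          rcases hb2 with h' | h'
          · simpa [hP2, decide_eq_true_eq] using h'
          · rw [h']
        have hnotlt : ¬ (out.1 < ans) := by
          intro hlt'
          have := hb1 out.1 hR1 hlt'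
          simp only [hP2, decide_eq_false_iff_not, not_le] at this
          omega
        have hnotgt : ¬ (ans < out.1) := by
          intro hlt'
          have hD := hR5 ans (by omega) hlt'
          have hFans : sumClamp a ans < target := hFlt ans (by omega) (by omega)
          rw [abs_of_neg (by omega)] at hD
          omega
        omega
      · -- the winning candidate is i0 itself (and out.1 = i0)
        have hi0hi : i0 ≤ hi := by omega
        have hFi0 : target ≤ sumClamp a i0 := hFge hi0hi
        have hFRge : target ≤ sumClamp a out.1 := le_trans hFi0 (sumClamp_mono a (by omega))
        have hgR : sumClamp a out.1 - target = out.2 := by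
          rw [abs_of_nonneg (by omega)] at hR3; exact hR3
        have hmR : sumClamp a i0 ≤ sumClamp a out.1 := sumClamp_mono a (by omega)
        have hd2le : |sumClamp a i0 - target| ≤ out.2 := by
          rw [abs_of_nonneg (by omega)]; omega
        have hd2ge : out.2 ≤ |sumClamp a i0 - target| := hC2 _ (by omega) (by omega)
        have hd2 : |sumClamp a i0 - target| = out.2 := le_antisymm hd2le hd2ge
        have hReq : out.1 = i0 := by
          by_contra hne
          have hgt : i0 < out.1 := by omega
          have hD := hR5 i0 (by omega) hgt
          omega
        have hs2snd : out.2 < (s2Of a target i0).2 := by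
          unfold s2Of
          split_ifs with h1 h2
          · exact hR5 (i0 - 1) h1 (by omega)
          · exact hR4
          · exact hR4
        have hs3 : s3Of a target i0 hi = (i0, out.2) := by
          unfold s3Of
          rw [if_pos hi0hi, hd2, if_pos hs2snd]
        unfold tailB
        rw [hs3]
        rw [show ((i0, out.2) : Int × Int).1 = i0 from rfl]
        rw [if_neg (by omega : ¬ i0 = 0)]
        set P2 := fun i => decide (sumClamp a i0 ≤ sumClamp a i) with hP2
        have hmono2 : ∀ i j, i ≤ j → P2 i = true → P2 j = true := by
          intro i j hij hp
          simp only [hP2, decide_eq_true_eq] at *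
          exact le_trans hp (sumClamp_mono a hij)
        obtain ⟨hb1, hb2, hb3, hb4⟩ := bsearch_spec P2 i0 hmono2 1 (i0 - 1) i0
          (by omega) (by omega) (Or.inl (by simp [hP2])) (by intro i h1 h2; omega)
        set ans := bsearchLeast P2 1 (i0 - 1) i0 with hans
        have hfin : ans = i0 := by
          rcases hb2 with h' | h'
          · by_contra hne
            have hlt' : ans < i0 := by omega
            have hFans : sumClamp a ans < target := hFlt ans (by omega) hlt'
            simp only [hP2, decide_eq_true_eq] at h'
            omega
          · exact h'
        rw [hReq, hfin]

-- ===== VERDICT (by name: the statement is the Claim_ definition above) =====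
theorem solution_spec : Claim_equal_solution := by
  intro arr target _ hpre
  unfold Spec_solution
  rw [solution_eq_runA, solution_alt_eq_runB]
  exact runA_eq_runB _ target (PySem.List.sorted_pairwise arr (fun x => x))
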